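-- pv_equiv track=rewrite | github.com/al078788-bot/Practica-6-78788 | mi_modelado_78788/diseño.py | calcular_presupuesto
-- ===== SOURCE A (Python) =====
-- def calcular_presupuesto(conceptos):
--     """
--     Recibe una lista de conceptos con (nombre, cantidad, precio_unitario)
--     Devuelve una lista con subtotales y el total general.
--     """
--     resultados = []
--     total_general = 0
--
--     for nombre, cantidad, precio_unitario in conceptos:
--         subtotal = cantidad * precio_unitario
--         resultados.append((nombre, cantidad, precio_unitario, subtotal))
--         total_general += subtotal
--
--     return resultados, total_general
-- ===== SOURCE B (Python) =====
-- def calcular_presupuesto(conceptos):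
--     # Divide and conquer on index ranges: recurse on the two halves, concatenate
--     # the row lists and add the two totals (correct by associativity of ++ and +).
--     def go(lo, hi):
--         if hi - lo == 0:
--             return [], 0
--         if hi - lo == 1:
--             nombre, cantidad, precio_unitario = conceptos[lo]
--             subtotal = cantidad * precio_unitario
--             return [(nombre, cantidad, precio_unitario, subtotal)], subtotal
--         mid = (lo + hi) // 2
--         filas_izq, total_izq = go(lo, mid)
--         filas_der, total_der = go(mid, hi)
--         return filas_izq + filas_der, total_izq + total_der
--     return go(0, len(conceptos))
-- ===== Notes on version B (the rewrite author's own statement) =====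
-- stated objective: alternative
-- what changed: Replaces A's single left-to-right fused loop (append + running total) with a divide-and-conquer recursion that splits the index range in half, recurses on both halves, and combines by list concatenation and addition of subtotal sums.
import Mathlib
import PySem

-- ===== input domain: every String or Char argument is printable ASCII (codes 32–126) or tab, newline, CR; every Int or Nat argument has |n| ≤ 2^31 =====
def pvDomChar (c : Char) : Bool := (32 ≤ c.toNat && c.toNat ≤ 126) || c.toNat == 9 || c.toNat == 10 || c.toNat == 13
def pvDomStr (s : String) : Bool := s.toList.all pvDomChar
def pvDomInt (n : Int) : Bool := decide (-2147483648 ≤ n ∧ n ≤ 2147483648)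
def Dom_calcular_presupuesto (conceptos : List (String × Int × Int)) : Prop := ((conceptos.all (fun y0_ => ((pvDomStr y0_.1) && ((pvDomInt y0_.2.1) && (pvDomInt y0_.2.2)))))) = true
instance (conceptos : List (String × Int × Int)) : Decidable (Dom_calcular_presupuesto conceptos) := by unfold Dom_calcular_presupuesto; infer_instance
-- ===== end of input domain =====

-- B replaces A's fused left-to-right loop with a divide-and-conquer recursion over index
-- halves, combining by concatenation and addition (objective: alternative; return value only).

-- ===== PORT A =====
-- A: one loop carrying (resultados, total_general), appending each row and adding its subtotal.
def calcular_presupuesto (conceptos : List (String × Int × Int)) : (List (String × Int × Int × Int)) × Int :=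
  conceptos.foldl
    (fun st c =>
      let subtotal := c.2.1 * c.2.2
      (st.1 ++ [(c.1, c.2.1, c.2.2, subtotal)], st.2 + subtotal))
    ([], 0)

-- ===== PORT B =====
-- B's inner go(lo, hi): split the index range at mid, recurse on both halves, combine.
-- Python's conceptos[lo] (always in range here, 0 ≤ lo < len) is ported as getD lo default.
def pbGo (conceptos : List (String × Int × Int)) (lo hi : Nat) : (List (String × Int × Int × Int)) × Int :=
  if hi - lo = 0 then ([], 0)
  else if hi - lo = 1 then
    let c := conceptos.getD lo ("", 0, 0)
    let subtotal := c.2.1 * c.2.2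
    ([(c.1, c.2.1, c.2.2, subtotal)], subtotal)
  else
    let mid := (lo + hi) / 2
    let izq := pbGo conceptos lo mid
    let der := pbGo conceptos mid hi
    (izq.1 ++ der.1, izq.2 + der.2)
termination_by hi - lo
decreasing_by all_goals omega

def calcular_presupuesto_alt (conceptos : List (String × Int × Int)) : (List (String × Int × Int × Int)) × Int :=
  pbGo conceptos 0 conceptos.length

-- ===== PRECONDITION & SPEC =====
def Spec_calcular_presupuesto (conceptos : List (String × Int × Int)) (out : (List (String × Int × Int × Int)) × Int) : Prop := out = calcular_presupuesto_alt conceptos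
instance (conceptos : List (String × Int × Int)) (out : (List (String × Int × Int × Int)) × Int) : Decidable (Spec_calcular_presupuesto conceptos out) := by unfold Spec_calcular_presupuesto; infer_instance

-- ===== CLAIM =====
def Claim_equal_calcular_presupuesto : Prop := ∀ (conceptos : List (String × Int × Int)), Dom_calcular_presupuesto conceptos → Spec_calcular_presupuesto conceptos (calcular_presupuesto conceptos)

-- ===== LEMMAS AND PROOFS =====

-- Closed form both sides are compared against: the rows and the sum of subtotals.
def pvRows (xs : List (String × Int × Int)) : (List (String × Int × Int × Int)) × Int :=
  (xs.map (fun c => (c.1, c.2.1, c.2.2, c.2.1 * c.2.2)),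
   (xs.map (fun c => c.2.1 * c.2.2)).sum)

theorem pvRows_append (xs ys : List (String × Int × Int)) :
    pvRows (xs ++ ys) = ((pvRows xs).1 ++ (pvRows ys).1, (pvRows xs).2 + (pvRows ys).2) := by
  simp [pvRows]

-- A's loop invariant.
theorem calcular_presupuesto_loop (conceptos : List (String × Int × Int))
    (acc : List (String × Int × Int × Int)) (t : Int) :
    conceptos.foldl
      (fun st c =>
        let subtotal := c.2.1 * c.2.2
        (st.1 ++ [(c.1, c.2.1, c.2.2, subtotal)], st.2 + subtotal))
      (acc, t)
    = (acc ++ (pvRows conceptos).1, t + (pvRows conceptos).2) := by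
  induction conceptos generalizing acc t with
  | nil => simp [pvRows]
  | cons c cs ih =>
      simp only [List.foldl_cons, ih, pvRows, List.map_cons, List.sum_cons]
      refine Prod.ext (by simp) (by simp; ring)

-- B's recursion computes pvRows on the segment [lo, hi).
theorem pbGo_eq (conceptos : List (String × Int × Int)) (lo hi : Nat)
    (h1 : lo ≤ hi) (h2 : hi ≤ conceptos.length) :
    pbGo conceptos lo hi = pvRows ((conceptos.drop lo).take (hi - lo)) := by
  induction lo, hi using pbGo.induct conceptos with
  | case1 lo hi h0 =>
      rw [pbGo]
      simp [h0, pvRows]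
  | case2 lo hi h0 hone =>
      rw [pbGo]
      have hlt : lo < conceptos.length := by omega
      have ht : List.take 1 (List.drop lo conceptos) = [conceptos[lo]] := by
        rw [List.drop_eq_getElem_cons hlt]; rfl
      rw [hone, ht]
      simp [pvRows, List.getD_eq_getElem?_getD, List.getElem?_eq_getElem hlt]
  | case3 lo hi h0 hone _x1 ih1 ih2 =>
      rw [pbGo]
      simp only [h0, if_false, hone]
      set mid := (lo + hi) / 2 with hmid
      have hm1 : lo ≤ mid := by omega
      have hm2 : mid ≤ hi := by omega
      have e1 : pbGo conceptos lo mid = pvRows ((conceptos.drop lo).take (mid - lo)) := ih1 hm1 (by omega)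
      have e2 : pbGo conceptos mid hi = pvRows ((conceptos.drop mid).take (hi - mid)) := ih2 hm2 h2
      have hseg : (conceptos.drop lo).take (mid - lo) ++ (conceptos.drop mid).take (hi - mid)
          = (conceptos.drop lo).take (hi - lo) := by
        have : conceptos.drop mid = (conceptos.drop lo).drop (mid - lo) := by
          rw [List.drop_drop]; congr 1; omega
        rw [this, ← List.take_add]
        congr 1; omega
      rw [e1, e2, ← hseg, pvRows_append]

-- ===== VERDICT =====
theorem calcular_presupuesto_spec : Claim_equal_calcular_presupuesto := by
  intro conceptos _
  unfold Spec_calcular_presupuesto calcular_presupuesto calcular_presupuesto_alt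
  rw [calcular_presupuesto_loop, pbGo_eq conceptos 0 conceptos.length (Nat.zero_le _) le_rfl]
  simp
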